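-- pv_equiv track=rewrite | github.com/chibicitiberiu/chord-notepad | src/audio/guitar_chord_picker.py | _transpose_shape
-- ===== SOURCE A (Python) =====
-- from typing import Dict, List, Optional, Tuple, Set, Union, TYPE_CHECKING
--
-- def _transpose_shape(shape: Dict, target_root: str, position: int) -> Optional[List[int]]:
--     """Transpose a chord shape to a new position"""
--
--     pattern = shape['pattern']
--     transposed = []
--
--     for fret in pattern:
--         if fret == -1:
--             transposed.append(-1)
--         elif fret == 0 and position == 0:
--             transposed.append(0)
--         else:
--             new_fret = fret + position
--             if new_fret > 12:  # Too high
--                 return None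
--             transposed.append(new_fret)
--
--     return transposed
-- ===== SOURCE B (Python) =====
-- def _transpose_shape(shape, target_root, position):
--     """Transpose a chord shape to a new position"""
--     pattern = shape['pattern']
--     # pass 1: feasibility check
--     if any(fret != -1 and not (fret == 0 and position == 0) and fret + position > 12
--            for fret in pattern):
--         return None
--     # pass 2: build the transposed pattern
--     return [-1 if fret == -1 else (0 if fret == 0 and position == 0 else fret + position)
--             for fret in pattern]
-- ===== Notes on version B (the rewrite author's own statement) =====
-- stated objective: alternative
-- what changed: Replaces A's single validate-and-build loop with early return by two separate passes: an any() feasibility scan followed by a pure list comprehension.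
-- outside the precondition, e.g. on _transpose_shape({}, 'C', 0): A raises KeyError, B raises KeyError
import Mathlib
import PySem

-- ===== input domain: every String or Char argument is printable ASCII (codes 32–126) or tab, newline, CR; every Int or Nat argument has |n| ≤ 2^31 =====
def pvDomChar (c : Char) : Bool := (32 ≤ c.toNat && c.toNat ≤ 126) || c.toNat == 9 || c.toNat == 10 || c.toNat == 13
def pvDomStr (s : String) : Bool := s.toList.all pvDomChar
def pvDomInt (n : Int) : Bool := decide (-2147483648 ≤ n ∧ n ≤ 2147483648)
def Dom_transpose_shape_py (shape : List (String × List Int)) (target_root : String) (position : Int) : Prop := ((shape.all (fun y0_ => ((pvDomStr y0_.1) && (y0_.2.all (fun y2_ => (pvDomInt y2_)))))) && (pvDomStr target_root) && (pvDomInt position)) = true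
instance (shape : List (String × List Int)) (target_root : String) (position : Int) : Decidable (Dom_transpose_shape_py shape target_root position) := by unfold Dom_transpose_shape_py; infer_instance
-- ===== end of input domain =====

-- B splits A's single validate-and-build loop into a feasibility scan (any) plus a pure map; objective: alternative decomposition, same cost.


-- ===== PORT A =====
-- A's for-loop: builds the list front-to-back (accumulator reversed at the end), early return none on new_fret > 12
def transposeLoopA (position : Int) : List Int → List Int → Option (List Int)
  | [], acc => some acc.reverse
  | fret :: rest, acc =>
    if fret = -1 then transposeLoopA position rest (-1 :: acc)
    else if fret = 0 ∧ position = 0 then transposeLoopA position rest (0 :: acc)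
    else
      let new_fret := fret + position
      if new_fret > 12 then none
      else transposeLoopA position rest (new_fret :: acc)

def transpose_shape_py (shape : List (String × List Int)) (target_root : String) (position : Int) : Option (List Int) :=
  match (PySem.Dict.mk shape).get? "pattern" with
  | none => none  -- KeyError in Python; excluded by Pre_
  | some pattern => transposeLoopA position pattern []

-- ===== PORT B =====
def transpose_shape_py_alt (shape : List (String × List Int)) (target_root : String) (position : Int) : Option (List Int) :=
  match (PySem.Dict.mk shape).get? "pattern" with
  | none => none  -- KeyError in Python; excluded by Pre_
  | some pattern =>
    if pattern.any (fun fret => fret ≠ -1 && !(fret == 0 && position == 0) && fret + position > 12)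
    then none
    else some (pattern.map (fun fret =>
      if fret = -1 then -1 else if fret = 0 ∧ position = 0 then 0 else fret + position))

-- ===== PRECONDITION & SPEC =====
-- Pre_ excludes only shapes without a 'pattern' key, on which Python A raises KeyError.
def Pre_transpose_shape_py (shape : List (String × List Int)) (target_root : String) (position : Int) : Prop :=
  ((PySem.Dict.mk shape).get? "pattern").isSome = true
instance (shape : List (String × List Int)) (target_root : String) (position : Int) : Decidable (Pre_transpose_shape_py shape target_root position) := by unfold Pre_transpose_shape_py; infer_instance

def pvWitness_transpose_shape_py : (List (String × List Int)) × String × Int :=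
  ([("pattern", [0, 2, 2, 1, 0, 0])], "E", 3)

def Spec_transpose_shape_py (shape : List (String × List Int)) (target_root : String) (position : Int) (out : Option (List Int)) : Prop := out = transpose_shape_py_alt shape target_root position
instance (shape : List (String × List Int)) (target_root : String) (position : Int) (out : Option (List Int)) : Decidable (Spec_transpose_shape_py shape target_root position out) := by unfold Spec_transpose_shape_py; infer_instance

-- ===== CLAIM (what is proved, stated in full; the proofs are below) =====
def Claim_equal_transpose_shape_py : Prop := ∀ (shape : List (String × List Int)) (target_root : String) (position : Int), Dom_transpose_shape_py shape target_root position → Pre_transpose_shape_py shape target_root position → Spec_transpose_shape_py shape target_root position (transpose_shape_py shape target_root position)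

-- ===== LEMMAS AND PROOFS =====

theorem transposeLoopA_eq (position : Int) (pattern acc : List Int) :
    transposeLoopA position pattern acc =
      (if pattern.any (fun fret => fret ≠ -1 && !(fret == 0 && position == 0) && fret + position > 12)
       then none
       else some (acc.reverse ++ pattern.map (fun fret =>
         if fret = -1 then -1 else if fret = 0 ∧ position = 0 then 0 else fret + position))) := by
  induction pattern generalizing acc with
  | nil => simp [transposeLoopA]
  | cons fret rest ih =>
    simp only [List.any_cons, List.map_cons]
    by_cases h1 : fret = -1
    · subst h1
      have hstep : transposeLoopA position (-1 :: rest) acc = transposeLoopA position rest (-1 :: acc) := by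
        simp [transposeLoopA]
      have hp : ((-1 : Int) ≠ -1 && !((-1 : Int) == 0 && position == 0) && (-1 : Int) + position > 12) = false := by simp
      rw [hstep, ih, hp]
      simp only [Bool.false_or]
      split_ifs <;> simp_all
    · by_cases h2 : fret = 0 ∧ position = 0
      · obtain ⟨h2a, h2b⟩ := h2
        subst h2a; subst h2b
        have hstep : transposeLoopA 0 (0 :: rest) acc = transposeLoopA 0 rest (0 :: acc) := by
          simp [transposeLoopA]
        have hp : ((0 : Int) ≠ -1 && !((0 : Int) == 0 && (0 : Int) == 0) && (0 : Int) + 0 > 12) = false := by simp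
        rw [hstep, ih, hp]
        simp only [Bool.false_or]
        split_ifs <;> simp_all
      · have hstep : transposeLoopA position (fret :: rest) acc =
            if fret + position > 12 then none else transposeLoopA position rest ((fret + position) :: acc) := by
          simp [transposeLoopA, h1, h2]
        have hp : (fret ≠ -1 && !(fret == 0 && position == 0) && fret + position > 12)
            = decide (fret + position > 12) := by
          by_cases h3 : fret + position > 12 <;> simp [h1, h3] <;> tauto
        rw [hstep, hp]
        by_cases h3 : fret + position > 12
        · simp [h3]
        · rw [if_neg h3, ih]
          rw [show (decide (fret + position > 12) || rest.any fun fret => fret ≠ -1 && !(fret == 0 && position == 0) && fret + position > 12) = rest.any fun fret => fret ≠ -1 && !(fret == 0 && position == 0) && fret + position > 12 from by simp [h3]]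
          split_ifs <;> simp_all

-- ===== VERDICT (by name: the statement is the Claim_ definition above) =====
theorem transpose_shape_py_spec : Claim_equal_transpose_shape_py := by
  intro shape target_root position _ _
  unfold Spec_transpose_shape_py transpose_shape_py transpose_shape_py_alt
  cases h : (PySem.Dict.mk shape).get? "pattern" with
  | none => rfl
  | some pattern => simp [transposeLoopA_eq]
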